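-- pv_equiv track=rewrite | github.com/pypi-data/pypi-mirror-368 | packages/emzed/emzed-3.0.0a24-cp312-cp312-win_amd64.whl/emzed/chemistry/formula_parser.py | _parse_optional_int
-- ===== SOURCE A (Python) =====
-- from string import digits as _DIGITS
--
-- def _next(reminder):
--     return reminder[0], reminder[1:]
--
-- def _parse_optional_int(reminder):
--     count = 0
--     # counst start with digit > 0
--     if reminder[0] in "123456789":
--         count = int(reminder[0])
--         reminder = reminder[1:]
--         while reminder[0] in _DIGITS:
--             token, reminder = _next(reminder)
--             count = 10 * count + int(token)
--     return count, reminder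
-- ===== SOURCE B (Python) =====
-- def _parse_optional_int(reminder):
--     if reminder and reminder[0] in "123456789":
--         i = 1
--         n = len(reminder)
--         while i < n and "0" <= reminder[i] <= "9":
--             i += 1
--         count = 0
--         place = 1
--         for ch in reversed(reminder[:i]):
--             count += (ord(ch) - 48) * place
--             place *= 10
--         return count, reminder[i:]
--     return 0, reminder
-- ===== Notes on version B (the rewrite author's own statement) =====
-- stated objective: alternative
-- what changed: B finds the end index of the digit run with a bounded boundary scan and accumulates the value back-to-front by place value, instead of A's per-character consume-and-rebuild Horner accumulation.
import Mathlib
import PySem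

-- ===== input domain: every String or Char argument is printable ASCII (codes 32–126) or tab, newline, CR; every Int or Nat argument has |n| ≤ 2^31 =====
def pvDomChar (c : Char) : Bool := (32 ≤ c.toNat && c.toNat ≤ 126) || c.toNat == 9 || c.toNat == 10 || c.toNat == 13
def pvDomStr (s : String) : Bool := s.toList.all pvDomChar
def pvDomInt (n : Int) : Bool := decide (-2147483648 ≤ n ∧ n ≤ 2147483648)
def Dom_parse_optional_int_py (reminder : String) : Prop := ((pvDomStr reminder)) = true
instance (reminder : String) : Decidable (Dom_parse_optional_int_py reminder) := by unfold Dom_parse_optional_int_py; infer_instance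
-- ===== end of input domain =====

-- B replaces A's per-character consume-and-rebuild Horner accumulation by a boundary-index scan
-- plus a back-to-front place-value accumulation; equivalence is proved on Pre_ (exactly where A returns).


-- ===== PORT A =====
-- _DIGITS = string.digits; `ch in "0123456789"` on a 1-char string is membership among its characters
def pvDigits : List Char := ['0', '1', '2', '3', '4', '5', '6', '7', '8', '9']
def pvNonZero : List Char := ['1', '2', '3', '4', '5', '6', '7', '8', '9']

-- int(token) for a 1-character string token
def pvIntOfDigit (c : Char) : Int := (PySem.Int.ofChars? [c]).getD 0

-- the `while reminder[0] in _DIGITS` loop with `token, reminder = _next(reminder)`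
def pvALoop (count : Int) (cs : List Char) : Int × List Char :=
  match cs with
  | [] => (count, [])                  -- Python: reminder[0] raises IndexError here (excluded by Pre_)
  | c :: rest =>
    if c ∈ pvDigits then
      pvALoop (10 * count + pvIntOfDigit c) rest
    else (count, c :: rest)

def parse_optional_int_py (reminder : String) : Int × String :=
  match reminder.toList with
  | [] => (0, reminder)                -- Python: reminder[0] raises IndexError (excluded by Pre_)
  | c :: rest =>
    if c ∈ pvNonZero then
      let r := pvALoop (pvIntOfDigit c) rest
      (r.1, String.ofList r.2)
    else (0, reminder)

-- ===== PORT B =====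
-- `while i < n and "0" <= reminder[i] <= "9": i += 1`  (1-char string comparison = Char order)
-- the index loop is transcribed structurally over the suffix reminder[i:] (i < n ↔ suffix nonempty)
def pvBScanAux : List Char → Nat → Nat
  | [], i => i
  | c :: rest, i => if '0' ≤ c ∧ c ≤ '9' then pvBScanAux rest (i + 1) else i

def pvBScan (cs : List Char) (i : Nat) : Nat := pvBScanAux (cs.drop i) i

-- `count += (ord(ch) - 48) * place; place *= 10`
def pvBStep (st : Int × Int) (c : Char) : Int × Int :=
  (st.1 + ((c.toNat : Int) - 48) * st.2, 10 * st.2)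

def parse_optional_int_py_alt (reminder : String) : Int × String :=
  match reminder.toList with           -- `if reminder and reminder[0] in "123456789"`
  | [] => (0, reminder)
  | c :: _ =>
    if c ∈ pvNonZero then
      let cs := reminder.toList
      let i := pvBScan cs 1
      let st := ((cs.take i).reverse).foldl pvBStep (0, 1)   -- for ch in reversed(reminder[:i])
      (st.1, String.ofList (cs.drop i))
    else (0, reminder)

-- ===== PRECONDITION & SPEC =====
-- ASCII digit tests by code point ('0'-'9' is 48-57, '1'-'9' is 49-57)
def pvIsDigitB (c : Char) : Bool := 48 ≤ c.toNat && c.toNat ≤ 57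
def pvIsOneNineB (c : Char) : Bool := 49 ≤ c.toNat && c.toNat ≤ 57

-- Pre_ excludes exactly the inputs where A raises IndexError: the empty string, and strings that
-- start with a digit 1-9 and consist entirely of ASCII digits (A's loop runs off the end).
def Pre_parse_optional_int_py (reminder : String) : Prop :=
  reminder.toList ≠ [] ∧
    (pvIsOneNineB (reminder.toList.headD ' ') = true →
      reminder.toList.any (fun c => !pvIsDigitB c) = true)
instance (reminder : String) : Decidable (Pre_parse_optional_int_py reminder) := by
  unfold Pre_parse_optional_int_py; infer_instance

def pvWitness_parse_optional_int_py : String := "12a"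

def Spec_parse_optional_int_py (reminder : String) (out : Int × String) : Prop :=
  out = parse_optional_int_py_alt reminder
instance (reminder : String) (out : Int × String) : Decidable (Spec_parse_optional_int_py reminder out) := by
  unfold Spec_parse_optional_int_py; infer_instance

-- ===== CLAIM (what is proved, stated in full; the proofs are below) =====
def Claim_equal_parse_optional_int_py : Prop :=
  ∀ (reminder : String), Dom_parse_optional_int_py reminder →
    Pre_parse_optional_int_py reminder →
      Spec_parse_optional_int_py reminder (parse_optional_int_py reminder)

-- ===== LEMMAS AND PROOFS =====

-- Horner accumulation of A's loop, as a fold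
def pvH (a : Int) (ds : List Char) : Int :=
  ds.foldl (fun acc c => 10 * acc + ((c.toNat : Int) - 48)) a

theorem pvCharEq {c d : Char} (h : c.toNat = d.toNat) : c = d :=
  Char.ext (UInt32.toNat_inj.mp h)

theorem pvDigitVal (c : Char) (h : c ∈ pvDigits) :
    pvIntOfDigit c = (c.toNat : Int) - 48 := by
  fin_cases h <;> decide

theorem pvNineSub (c : Char) (h : c ∈ pvNonZero) : c ∈ pvDigits := by
  fin_cases h <;> decide

theorem pvRangeIffMem (c : Char) : ('0' ≤ c ∧ c ≤ '9') ↔ c ∈ pvDigits := by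
  constructor
  · rintro ⟨h1, h2⟩
    have h3 : 48 ≤ c.toNat := h1
    have h4 : c.toNat ≤ 57 := h2
    interval_cases h : c.toNat
    all_goals first
      | (rw [show c = '0' from pvCharEq h]; decide)
      | (rw [show c = '1' from pvCharEq h]; decide)
      | (rw [show c = '2' from pvCharEq h]; decide)
      | (rw [show c = '3' from pvCharEq h]; decide)
      | (rw [show c = '4' from pvCharEq h]; decide)
      | (rw [show c = '5' from pvCharEq h]; decide)
      | (rw [show c = '6' from pvCharEq h]; decide)
      | (rw [show c = '7' from pvCharEq h]; decide)
      | (rw [show c = '8' from pvCharEq h]; decide)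
      | (rw [show c = '9' from pvCharEq h]; decide)
  · intro h; fin_cases h <;> exact ⟨by decide, by decide⟩

theorem pvIsDigitB_iff_mem (c : Char) : pvIsDigitB c = true ↔ c ∈ pvDigits := by
  constructor
  · intro hb
    simp only [pvIsDigitB, Bool.and_eq_true, decide_eq_true_eq] at hb
    exact (pvRangeIffMem c).mp ⟨hb.1, hb.2⟩
  · intro h; fin_cases h <;> decide

theorem pvIsOneNineB_iff_mem (c : Char) : pvIsOneNineB c = true ↔ c ∈ pvNonZero := by
  constructor
  · intro hb
    simp only [pvIsOneNineB, Bool.and_eq_true, decide_eq_true_eq] at hb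
    obtain ⟨h1, h2⟩ := hb
    interval_cases h : c.toNat
    all_goals first
      | (rw [show c = '1' from pvCharEq h]; decide)
      | (rw [show c = '2' from pvCharEq h]; decide)
      | (rw [show c = '3' from pvCharEq h]; decide)
      | (rw [show c = '4' from pvCharEq h]; decide)
      | (rw [show c = '5' from pvCharEq h]; decide)
      | (rw [show c = '6' from pvCharEq h]; decide)
      | (rw [show c = '7' from pvCharEq h]; decide)
      | (rw [show c = '8' from pvCharEq h]; decide)
      | (rw [show c = '9' from pvCharEq h]; decide)
  · intro h; fin_cases h <;> decide

theorem pvALoop_spec (ds : List Char) (e : Char) (tail : List Char)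
    (hds : ∀ x ∈ ds, x ∈ pvDigits) (he : e ∉ pvDigits) :
    ∀ a : Int, pvALoop a (ds ++ e :: tail) = (pvH a ds, e :: tail) := by
  induction ds with
  | nil => intro a; simp [pvALoop, pvH, he]
  | cons d ds ih =>
    intro a
    have hd : d ∈ pvDigits := hds d (by simp)
    rw [List.cons_append, pvALoop]
    simp only [hd, if_true, pvDigitVal d hd]
    rw [ih (fun x hx => hds x (by simp [hx]))]
    simp [pvH]

theorem pvBScanAux_spec (ds : List Char) (e : Char) (tail : List Char)
    (hds : ∀ x ∈ ds, x ∈ pvDigits) (he : e ∉ pvDigits) :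
    ∀ i : Nat, pvBScanAux (ds ++ e :: tail) i = i + ds.length := by
  induction ds with
  | nil =>
    intro i
    rw [List.nil_append, pvBScanAux, if_neg (fun hcond => he ((pvRangeIffMem e).mp hcond))]
    simp
  | cons d ds ih =>
    intro i
    have hd : d ∈ pvDigits := hds d (by simp)
    rw [List.cons_append, pvBScanAux, if_pos ((pvRangeIffMem d).mpr hd),
      ih (fun x hx => hds x (by simp [hx])) (i + 1)]
    simp only [List.length_cons]
    omega

theorem pvH_acc (l : List Char) : ∀ a : Int, pvH a l = a * 10 ^ l.length + pvH 0 l := by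
  induction l with
  | nil => intro a; simp [pvH]
  | cons x t ih =>
    intro a
    have h1 : pvH a (x :: t) = pvH (10 * a + ((x.toNat : Int) - 48)) t := by simp [pvH]
    have h2 : pvH 0 (x :: t) = pvH ((x.toNat : Int) - 48) t := by simp [pvH]
    rw [h1, h2, ih, ih ((x.toNat : Int) - 48)]
    simp only [List.length_cons, pow_succ]
    ring

theorem pvBFold (l : List Char) :
    l.reverse.foldl pvBStep (0, 1) = (pvH 0 l, 10 ^ l.length) := by
  induction l with
  | nil => simp [pvH]
  | cons x t ih =>
    rw [List.reverse_cons, List.foldl_append, ih]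
    have h2 : pvH 0 (x :: t) = pvH ((x.toNat : Int) - 48) t := by simp [pvH]
    simp only [List.foldl_cons, List.foldl_nil, pvBStep, h2, pvH_acc t ((x.toNat : Int) - 48)]
    simp only [Prod.mk.injEq, List.length_cons, pow_succ]
    exact ⟨by ring, by ring⟩

-- ===== VERDICT (by name: the statement is the Claim_ definition above) =====
theorem parse_optional_int_py_spec : Claim_equal_parse_optional_int_py := by
  intro reminder _ hpre
  unfold Spec_parse_optional_int_py
  obtain ⟨hne, himp⟩ := hpre
  rcases h : reminder.toList with _ | ⟨c, rest⟩
  · exact absurd h hne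
  by_cases hc : c ∈ pvNonZero
  · have hcd : c ∈ pvDigits := pvNineSub c hc
    have hany := himp (by rw [h]; simpa using (pvIsOneNineB_iff_mem c).mpr hc)
    obtain ⟨w, hw, hwb⟩ := List.any_eq_true.mp hany
    have hwnd : w ∉ pvDigits := by
      simp only [Bool.not_eq_eq_eq_not, Bool.not_true] at hwb
      intro hmem
      rw [(pvIsDigitB_iff_mem w).mpr hmem] at hwb
      exact absurd hwb (by decide)
    have hwrest : w ∈ rest := by
      have hw' := hw
      rw [h] at hw'
      rcases List.mem_cons.mp hw' with h1 | h1
      · exact absurd hcd (h1 ▸ hwnd)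
      · exact h1
    set p : Char → Bool := fun x => decide (x ∈ pvDigits) with hp
    have hsplit : rest.takeWhile p ++ rest.dropWhile p = rest := List.takeWhile_append_dropWhile
    have hdnil : rest.dropWhile p ≠ [] := by
      intro h0
      have hall := List.dropWhile_eq_nil_iff.mp h0 w hwrest
      simp only [hp, decide_eq_true_eq] at hall
      exact hwnd hall
    obtain ⟨e, tail, hdw⟩ := List.exists_cons_of_ne_nil hdnil
    set ds := rest.takeWhile p with hdsdef
    have hrest : rest = ds ++ e :: tail := by rw [← hsplit, hdw]
    have hds : ∀ x ∈ ds, x ∈ pvDigits := by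
      intro x hx
      simpa [hp] using List.mem_takeWhile_imp hx
    have he : e ∉ pvDigits := by
      have hfalse := List.head_dropWhile_not p hdnil
      have h1 : (rest.dropWhile p).head? = some e := by rw [hdw]; rfl
      rw [List.head?_eq_some_head hdnil] at h1
      rw [Option.some.inj h1] at hfalse
      simp only [hp, decide_eq_false_iff_not] at hfalse
      exact hfalse
    -- A's side
    have hA : parse_optional_int_py reminder = (pvH ((c.toNat : Int) - 48) ds, String.ofList (e :: tail)) := by
      unfold parse_optional_int_py
      rw [h]
      simp only [hc, if_true, hrest, pvALoop_spec ds e tail hds he, pvDigitVal c hcd]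
    -- B's side
    have hscan : pvBScan (c :: rest) 1 = 1 + ds.length := by
      unfold pvBScan
      rw [List.drop_succ_cons, List.drop_zero, hrest]
      exact pvBScanAux_spec ds e tail hds he 1
    have htake : (c :: rest).take (1 + ds.length) = c :: ds := by
      rw [hrest, show (1 : Nat) + ds.length = ds.length + 1 from by omega,
        List.take_succ_cons, List.take_left]
    have hdrop2 : (c :: rest).drop (1 + ds.length) = e :: tail := by
      rw [hrest, show (1 : Nat) + ds.length = ds.length + 1 from by omega,
        List.drop_succ_cons, List.drop_left]
    have hB : parse_optional_int_py_alt reminder = (pvH ((c.toNat : Int) - 48) ds, String.ofList (e :: tail)) := by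
      unfold parse_optional_int_py_alt
      rw [h]
      simp only [hc, if_true]
      rw [hscan, htake, hdrop2, pvBFold]
      simp [pvH]
    rw [hA, hB]
  · unfold parse_optional_int_py parse_optional_int_py_alt
    rw [h]
    simp [hc]
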